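-- pv_equiv track=rewrite | github.com/mit-ll/SPARTA | spar_python/common/aggregators/query_aggregator.py | reverse_multiple_num_helper
-- ===== SOURCE A (Python) =====
-- def reverse_multiple_num_helper(value_list, num, data):
--     '''
--     Search for a list of strings starting at the end of
--     the data string and separated by a specific number of characters.
--
--     value_list is the list of strings to search for (in Left to right
--       order even though this is a reverse method)
--     num is the number of characters to expect in between the values
--     data is the string to search in
--
--     For example: search for "stuff__stuff2"
--       value_list is ['stuff','stuff2']
--       num is 2
--
--     Returns a tuple of bools (matched, left_over_data)
--     Where "matched" is True if it found what it expected; False otherwise.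
--     Where "left_over_data" is always False if matched is False,
--     and True when there are remaining characters at the start of the data
--     string that were not matched by the values.
--     '''
--     assert(len(value_list) >= 1)
--
--     data_sz = len(data)
--     data_idx = data_sz
--     for value in reversed(value_list):
--         if data_idx < 0:
--             # ran out of data
--             return (False, False)
--         value_sz = len(value)
--         data_idx_start = data_idx - value_sz
--         if data_idx_start < 0:
--             # value too long
--             return (False, False)
--         if data[data_idx_start:data_idx] != value:
--             # not match value
--             return (False, False)
--         data_idx = data_idx_start - num
--
--     # check for left over characters in data
--     left_over_data =  data_idx + num > 0
--
--     return (True, left_over_data)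
-- ===== SOURCE B (Python) =====
-- def reverse_multiple_num_helper(value_list, num, data):
--     span = sum(len(v) for v in value_list) + num * (len(value_list) - 1)
--     start = len(data) - span
--     pos = start
--     for v in value_list:
--         if pos < 0 or data[pos:pos + len(v)] != v:
--             return (False, False)
--         pos += len(v) + num
--     return (True, start > 0)
-- ===== Notes on version B (the rewrite author's own statement) =====
-- stated objective: simpler
-- what changed: Replaces A's reverse scan that decrements a running end index with an up-front computation of the pattern's total span (sum of value lengths plus num-sized gaps) followed by a forward scan checking each value at its precomputed start position.
import Mathlib
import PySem

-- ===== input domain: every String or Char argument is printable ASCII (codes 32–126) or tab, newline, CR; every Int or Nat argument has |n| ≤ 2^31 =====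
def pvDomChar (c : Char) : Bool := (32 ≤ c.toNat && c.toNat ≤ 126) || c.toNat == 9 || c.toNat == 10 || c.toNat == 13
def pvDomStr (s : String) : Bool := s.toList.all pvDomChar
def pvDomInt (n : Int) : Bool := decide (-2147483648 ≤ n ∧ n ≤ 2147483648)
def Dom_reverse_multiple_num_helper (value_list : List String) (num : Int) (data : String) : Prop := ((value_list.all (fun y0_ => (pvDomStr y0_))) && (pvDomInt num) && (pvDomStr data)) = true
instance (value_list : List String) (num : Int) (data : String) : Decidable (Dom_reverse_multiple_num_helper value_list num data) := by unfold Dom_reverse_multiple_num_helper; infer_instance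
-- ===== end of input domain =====

-- B replaces A's reverse scan with a running end index by an up-front offset
-- computation (total span of the anchored pattern) plus a forward scan; objective:
-- simpler. Equivalence is about the return value; neither program mutates arguments.

-- ===== PORT A =====
-- A's `for value in reversed(value_list)` loop with its early returns (none = early return (False, False)),
-- carrying the running end index `data_idx`.
def pvALoop (data : String) (num : Int) : List String → Int → Option Int
  | [], data_idx => some data_idx
  | value :: rest, data_idx =>
    if data_idx < 0 then none
    else
      let value_sz : Int := PySem.Str.len value
      let data_idx_start := data_idx - value_sz
      if data_idx_start < 0 then none
      else if PySem.Str.slice data (some data_idx_start) (some data_idx) ≠ value then none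
      else pvALoop data num rest (data_idx_start - num)

def reverse_multiple_num_helper (value_list : List String) (num : Int) (data : String) : Bool × Bool :=
  let data_sz : Int := PySem.Str.len data
  match pvALoop data num value_list.reverse data_sz with
  | none => (false, false)
  | some data_idx => (true, decide (data_idx + num > 0))

-- ===== PORT B =====
-- B's forward loop: check each value at its precomputed position `pos`.
def pvBLoop (data : String) (num : Int) : List String → Int → Bool
  | [], _ => true
  | v :: rest, pos =>
    if pos < 0 then false
    else if PySem.Str.slice data (some pos) (some (pos + PySem.Str.len v)) ≠ v then false
    else pvBLoop data num rest (pos + PySem.Str.len v + num)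

def reverse_multiple_num_helper_alt (value_list : List String) (num : Int) (data : String) : Bool × Bool :=
  let span : Int := (value_list.map PySem.Str.len).sum + num * ((value_list.length : Int) - 1)
  let start : Int := PySem.Str.len data - span
  if pvBLoop data num value_list start then (true, decide (start > 0)) else (false, false)

-- ===== PRECONDITION & SPEC =====
-- Pre_ excludes the empty value_list, on which A's `assert len(value_list) >= 1` raises AssertionError.
def Pre_reverse_multiple_num_helper (value_list : List String) (num : Int) (data : String) : Prop :=
  value_list ≠ []
instance (value_list : List String) (num : Int) (data : String) : Decidable (Pre_reverse_multiple_num_helper value_list num data) := by unfold Pre_reverse_multiple_num_helper; infer_instance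

def pvWitness_reverse_multiple_num_helper : List String × Int × String := (["ab", "c"], 1, "xab_c")

def Spec_reverse_multiple_num_helper (value_list : List String) (num : Int) (data : String) (out : Bool × Bool) : Prop := out = reverse_multiple_num_helper_alt value_list num data
instance (value_list : List String) (num : Int) (data : String) (out : Bool × Bool) : Decidable (Spec_reverse_multiple_num_helper value_list num data out) := by unfold Spec_reverse_multiple_num_helper; infer_instance

-- ===== CLAIM (what is proved, stated in full; the proofs are below) =====
def Claim_equal_reverse_multiple_num_helper : Prop := ∀ (value_list : List String) (num : Int) (data : String), Dom_reverse_multiple_num_helper value_list num data → Pre_reverse_multiple_num_helper value_list num data → Spec_reverse_multiple_num_helper value_list num data (reverse_multiple_num_helper value_list num data)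


-- ===== LEMMAS AND PROOFS =====

-- Sum of (length + num) over a suffix of value_list: the total extent A's index walks over.
def pvSpan' (num : Int) (l : List String) : Int := (l.map (fun v => PySem.Str.len v + num)).sum

theorem pvALoop_append (data : String) (num : Int) (xs ys : List String) (idx : Int) :
    pvALoop data num (xs ++ ys) idx = (pvALoop data num xs idx).bind (pvALoop data num ys) := by
  induction xs generalizing idx with
  | nil => simp [pvALoop]
  | cons v rest ih =>
    simp only [List.cons_append, pvALoop]
    split_ifs <;> simp [ih]

theorem pvLoop_eq (data : String) (num : Int) (l : List String) (idx : Int) :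
    pvALoop data num l.reverse idx =
      (if pvBLoop data num l (idx - pvSpan' num l + num) then some (idx - pvSpan' num l) else none) := by
  induction l generalizing idx with
  | nil => simp [pvALoop, pvBLoop, pvSpan']
  | cons v rest ih =>
    have hrev : (v :: rest).reverse = rest.reverse ++ [v] := by simp
    rw [hrev, pvALoop_append, ih]
    have hlen : (0 : Int) ≤ PySem.Str.len v := by
      simp [PySem.Str.len_eq]
    have hspan : pvSpan' num (v :: rest) = PySem.Str.len v + num + pvSpan' num rest := by
      simp only [pvSpan', List.map_cons, List.sum_cons]
    set j := idx - pvSpan' num rest with hj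
    have harg : idx - pvSpan' num (v :: rest) + num = j - PySem.Str.len v := by
      rw [hspan]; omega
    have hres : idx - pvSpan' num (v :: rest) = j - PySem.Str.len v - num := by
      rw [hspan]; omega
    rw [harg, hres]
    have hpe : j - PySem.Str.len v + PySem.Str.len v = j := by omega
    by_cases hc : pvBLoop data num rest (j + num)
    · rw [if_pos hc, Option.bind_some]
      simp only [pvALoop, pvBLoop]
      by_cases h2 : j < 0
      · have h1 : j - PySem.Str.len v < 0 := by omega
        rw [if_pos h2, if_neg (by rw [if_pos h1]; simp)]
      · rw [if_neg h2]
        by_cases h1 : j - PySem.Str.len v < 0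
        · rw [if_pos h1, if_neg (by rw [if_pos h1]; simp)]
        · rw [if_neg h1]
          simp only [hpe]
          by_cases hs : PySem.Str.slice data (some (j - PySem.Str.len v)) (some j) = v
          · rw [if_neg (not_not_intro hs)]
            rw [if_pos (by rw [if_neg h1, if_neg (not_not_intro hs), hc])]
          · rw [if_pos hs, if_neg (by rw [if_neg h1, if_pos hs]; simp)]
    · rw [if_neg hc, Option.bind_none]
      simp only [pvBLoop]
      by_cases h1 : j - PySem.Str.len v < 0
      · rw [if_neg (by rw [if_pos h1]; simp)]
      · simp only [hpe]
        by_cases hs : PySem.Str.slice data (some (j - PySem.Str.len v)) (some j) = v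
        · rw [if_neg (by rw [if_neg h1, if_neg (not_not_intro hs)]; exact hc)]
        · rw [if_neg (by rw [if_neg h1, if_pos hs]; simp)]

theorem pvSpan'_eq (num : Int) (l : List String) :
    pvSpan' num l = (l.map PySem.Str.len).sum + num * (l.length : Int) := by
  rw [pvSpan', PySem.List.sum_map_add_int]
  simp [mul_comm]

theorem pv_main (value_list : List String) (num : Int) (data : String) :
    reverse_multiple_num_helper value_list num data = reverse_multiple_num_helper_alt value_list num data := by
  unfold reverse_multiple_num_helper reverse_multiple_num_helper_alt
  simp only [pvLoop_eq]
  have hst : PySem.Str.len data - pvSpan' num value_list + num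
      = PySem.Str.len data - ((value_list.map PySem.Str.len).sum + num * ((value_list.length : Int) - 1)) := by
    rw [pvSpan'_eq]; ring
  by_cases hb : pvBLoop data num value_list (PySem.Str.len data - pvSpan' num value_list + num)
  · rw [if_pos hb]
    rw [hst] at hb
    rw [if_pos hb]
    simp only []
    rw [← hst]
  · rw [if_neg hb]
    rw [hst] at hb
    rw [if_neg hb]

-- ===== VERDICT (by name: the statement is the Claim_ definition above) =====
theorem reverse_multiple_num_helper_spec : Claim_equal_reverse_multiple_num_helper := by
  intro value_list num data _ _
  unfold Spec_reverse_multiple_num_helper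
  exact pv_main value_list num data
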